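-- pv_equiv track=rewrite | github.com/zxt0217/WeatherMamba | weathermamba/models/weather_mamba.py | _distribute_depths
-- ===== SOURCE A (Python) =====
-- from typing import Dict, Optional, Sequence, Tuple
--
-- def _distribute_depths(total_layers: int, num_stages: int = 3) -> Tuple[int, ...]:
--     total_layers = max(int(total_layers), num_stages)
--     base = total_layers // num_stages
--     rem = total_layers % num_stages
--     depths = [base] * num_stages
--     for idx in range(rem):
--         depths[idx] += 1
--     return tuple(depths)
-- ===== SOURCE B (Python) =====
-- def _distribute_depths(total_layers: int, num_stages: int = 3):
--     total = max(int(total_layers), num_stages)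
--     return tuple(-(-(total - i) // num_stages) for i in range(num_stages))
-- ===== Notes on version B (the rewrite author's own statement) =====
-- stated objective: simpler
-- what changed: Replaces A's base/remainder computation plus mutate-in-place increment loop over the first rem stages by a single closed-form comprehension: depth i = ceil((total - i) / num_stages) via -(-(total-i)//num_stages).
import Mathlib
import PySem

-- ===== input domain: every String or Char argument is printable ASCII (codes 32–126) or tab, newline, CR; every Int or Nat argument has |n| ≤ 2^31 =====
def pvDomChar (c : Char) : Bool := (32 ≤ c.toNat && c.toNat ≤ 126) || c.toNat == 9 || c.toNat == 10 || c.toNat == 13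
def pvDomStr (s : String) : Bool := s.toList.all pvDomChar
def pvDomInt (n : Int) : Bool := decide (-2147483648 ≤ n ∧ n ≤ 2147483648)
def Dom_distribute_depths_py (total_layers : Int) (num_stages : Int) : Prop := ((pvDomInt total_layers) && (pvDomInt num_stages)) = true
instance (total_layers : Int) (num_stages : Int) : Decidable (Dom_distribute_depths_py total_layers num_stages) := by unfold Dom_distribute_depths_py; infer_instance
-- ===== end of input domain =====

-- B replaces A's remainder-adjustment loop by one closed-form map (depth i = ceil((total-i)/num_stages)); objective: simpler.

-- ===== PORT A =====
-- Literal port of Python A: base/rem, a list of `base`s, then `depths[idx] += 1` for idx in range(rem).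
-- (Indexing in the loop uses the total pyGetD/pySetD forms: idx is always a nonnegative in-range index there,
-- and the only Python exception — ZeroDivisionError at num_stages = 0 — is excluded by Pre_.)
def distribute_depths_py (total_layers : Int) (num_stages : Int) : List Int :=
  let total := max total_layers num_stages
  let base := PySem.Int.floordiv total num_stages
  let rem := PySem.Int.mod total num_stages
  let depths := List.replicate num_stages.toNat base
  (PySem.List.pyRange 0 rem 1).foldl
    (fun d idx => PySem.List.pySetD d idx (PySem.List.pyGetD d idx 0 + 1)) depths

-- ===== PORT B =====
-- Literal port of Source B: one comprehension, ceiling division -(-(total - i) // num_stages).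
def distribute_depths_py_alt (total_layers : Int) (num_stages : Int) : List Int :=
  let total := max total_layers num_stages
  (PySem.List.pyRange 0 num_stages 1).map
    (fun i => -(PySem.Int.floordiv (-(total - i)) num_stages))

-- ===== PRECONDITION & SPEC =====
-- Pre_ excludes only num_stages = 0, where Python A raises ZeroDivisionError.
def Pre_distribute_depths_py (total_layers : Int) (num_stages : Int) : Prop := num_stages ≠ 0
instance (total_layers : Int) (num_stages : Int) : Decidable (Pre_distribute_depths_py total_layers num_stages) := by unfold Pre_distribute_depths_py; infer_instance
def pvWitness_distribute_depths_py : Int × Int := (7, 3)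

def Spec_distribute_depths_py (total_layers : Int) (num_stages : Int) (out : List Int) : Prop := out = distribute_depths_py_alt total_layers num_stages
instance (total_layers : Int) (num_stages : Int) (out : List Int) : Decidable (Spec_distribute_depths_py total_layers num_stages out) := by unfold Spec_distribute_depths_py; infer_instance

-- ===== CLAIM (what is proved, stated in full; the proofs are below) =====
def Claim_equal_distribute_depths_py : Prop := ∀ (total_layers : Int) (num_stages : Int), Dom_distribute_depths_py total_layers num_stages → Pre_distribute_depths_py total_layers num_stages → Spec_distribute_depths_py total_layers num_stages (distribute_depths_py total_layers num_stages)

-- ===== LEMMAS AND PROOFS =====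

-- A's increment loop over range(r) turns l into "l with 1 added to the first r entries".
lemma incLoop (r : Nat) (l : List Int) (hr : r ≤ l.length) :
    (PySem.List.pyRange 0 (r : Int) 1).foldl
      (fun d idx => PySem.List.pySetD d idx (PySem.List.pyGetD d idx 0 + 1)) l
    = (List.range l.length).map (fun i => if i < r then l.getD i 0 + 1 else l.getD i 0) := by
  induction r with
  | zero =>
      rw [PySem.List.pyRange_one_eq_nil (by omega)]
      simp only [List.foldl_nil]
      apply List.ext_getElem (by simp)
      intro i h1 h2
      simp only [List.length_map, List.length_range] at h2
      simp [List.getD_eq_getElem?_getD, List.getElem?_eq_getElem h2]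
  | succ r ih =>
      have h1 : ((r + 1 : Nat) : Int) = (r : Int) + 1 := by push_cast; ring
      rw [h1, PySem.List.pyRange_one_succ_right (by omega), List.foldl_append, ih (by omega)]
      simp only [List.foldl_cons, List.foldl_nil]
      rw [PySem.List.pySetD_natCast, PySem.List.pyGetD_natCast]
      have hMr : ((List.range l.length).map
          (fun i => if i < r then l.getD i 0 + 1 else l.getD i 0)).getD r 0 = l.getD r 0 := by
        rw [List.getD_eq_getElem?_getD, List.getElem?_map, List.getElem?_range (by omega)]
        simp
      rw [hMr]
      apply List.ext_getElem (by simp)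
      intro i hl1 hl2
      simp only [List.length_map, List.length_range] at hl2
      rw [List.getElem_set]
      by_cases hir : r = i
      · subst hir
        rw [if_pos rfl, List.getElem_map, List.getElem_range]
        rw [if_pos (by omega)]
      · rw [if_neg hir]
        simp only [List.getElem_map, List.getElem_range]
        split_ifs <;> first | rfl | omega

-- pointwise: ceiling division gives exactly base (+1 on the first rem stages)
lemma pointwise (total s : Int) (i : Nat) (hs : 0 < s) (hi : (i : Int) < s) :
    -(PySem.Int.floordiv (-(total - (i : Int))) s)
      = if i < (PySem.Int.mod total s).toNat
          then PySem.Int.floordiv total s + 1 else PySem.Int.floordiv total s := by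
  have hmul := PySem.Int.floordiv_mul_add_mod total s
  have h0 := PySem.Int.mod_nonneg total (b := s) hs
  have h1 := PySem.Int.mod_lt total (b := s) hs
  split_ifs with h
  · rw [PySem.Int.neg_floordiv_neg_eq_iff_of_pos hs]
    have hm : (i : Int) < PySem.Int.mod total s := by omega
    constructor <;> nlinarith
  · rw [PySem.Int.neg_floordiv_neg_eq_iff_of_pos hs]
    have hm : PySem.Int.mod total s ≤ (i : Int) := by omega
    have hi0 : (0 : Int) ≤ (i : Int) := Int.natCast_nonneg i
    constructor <;> nlinarith

lemma main_eq (total_layers num_stages : Int) (hs : num_stages ≠ 0) :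
    distribute_depths_py total_layers num_stages = distribute_depths_py_alt total_layers num_stages := by
  simp only [distribute_depths_py, distribute_depths_py_alt]
  rcases lt_or_gt_of_ne hs with hneg | hpos
  · -- num_stages < 0 : both sides are []
    have hrem := PySem.Int.mod_neg_bounds (max total_layers num_stages) hneg
    have hns : num_stages ≤ 0 := le_of_lt hneg
    have hr0 : PySem.Int.mod (max total_layers num_stages) num_stages ≤ 0 := hrem.2
    rw [PySem.List.pyRange_one_eq_nil hr0, PySem.List.pyRange_one_eq_nil hns,
      Int.toNat_of_nonpos hns]
    simp
  · -- num_stages > 0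
    have h0 := PySem.Int.mod_nonneg (max total_layers num_stages) (b := num_stages) hpos
    have h1 := PySem.Int.mod_lt (max total_layers num_stages) (b := num_stages) hpos
    rw [show PySem.Int.mod (max total_layers num_stages) num_stages
          = ((PySem.Int.mod (max total_layers num_stages) num_stages).toNat : Int) from
        (Int.toNat_of_nonneg h0).symm]
    rw [incLoop _ _ (by simp only [List.length_replicate]; omega)]
    rw [PySem.List.pyRange_one]
    simp only [List.length_replicate, List.map_map, sub_zero, zero_add]
    apply List.map_congr_left
    intro i hi
    have hi' : i < num_stages.toNat := List.mem_range.mp hi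
    have hgd : (List.replicate num_stages.toNat
          (PySem.Int.floordiv (max total_layers num_stages) num_stages)).getD i 0
        = PySem.Int.floordiv (max total_layers num_stages) num_stages := by
      rw [List.getD_eq_getElem?_getD, List.getElem?_replicate]
      simp [hi']
    rw [hgd]
    exact (pointwise (max total_layers num_stages) num_stages i hpos (by omega)).symm

-- ===== VERDICT (by name: the statement is the Claim_ definition above) =====
theorem distribute_depths_py_spec : Claim_equal_distribute_depths_py := by
  intro t s _ hpre
  unfold Spec_distribute_depths_py
  exact main_eq t s hpre
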